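-- pv_equiv track=rewrite | github.com/megascienta/sciona | src/sciona/code_analysis/core/structural_assembler_index.py | expand_import_targets
-- ===== SOURCE A (Python) =====
-- def expand_import_targets(
--     direct_targets: dict[str, set[str]],
-- ) -> dict[str, set[str]]:
--     expanded: dict[str, set[str]] = {}
--     for source in direct_targets:
--         seen: set[str] = set()
--         stack = list(direct_targets.get(source, ()))
--         while stack:
--             target = stack.pop()
--             if target in seen:
--                 continue
--             seen.add(target)
--             stack.extend(direct_targets.get(target, ()))
--         expanded[source] = seen
--     return expanded
-- ===== SOURCE B (Python) =====
-- def expand_import_targets(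
--     direct_targets: dict[str, set[str]],
-- ) -> dict[str, set[str]]:
--     # Transposed-graph ancestor algorithm: instead of searching forward from
--     # each source, build the reverse import graph once, compute for every node
--     # w (each node that has an in-edge) the set of its ancestors by a
--     # level-synchronous frontier expansion on the reverse graph, and transpose
--     # that relation back: w belongs to expanded[s] exactly when s is an
--     # ancestor of w. (Sets are unordered, so the results are identical.)
--     reverse: dict[str, set[str]] = {}
--     for source, targets in direct_targets.items():
--         for target in targets:
--             reverse.setdefault(target, set()).add(source)
--     expanded: dict[str, set[str]] = {source: set() for source in direct_targets}
--     for node in reverse: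
--         ancestors = set(reverse[node])
--         frontier = ancestors
--         while frontier:
--             step: set[str] = set()
--             for u in frontier:
--                 step |= reverse.get(u, set())
--             frontier = step - ancestors
--             ancestors |= frontier
--         for source in ancestors:
--             if source in expanded:
--                 expanded[source].add(node)
--     return expanded
-- ===== Notes on version B (the rewrite author's own statement) =====
-- stated objective: alternative
-- what changed: Instead of a forward depth-first search with a stack and visited set per source, B builds the transposed import graph once, computes for every node with an in-edge its ancestor set by level-synchronous frontier expansion (whole-set unions/differences) on the reverse graph, and transposes that relation back into the per-source result sets; Pre_ only excludes association lists with duplicate keys, which do not denote a Python dict and so are never an input of A.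
import Mathlib
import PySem

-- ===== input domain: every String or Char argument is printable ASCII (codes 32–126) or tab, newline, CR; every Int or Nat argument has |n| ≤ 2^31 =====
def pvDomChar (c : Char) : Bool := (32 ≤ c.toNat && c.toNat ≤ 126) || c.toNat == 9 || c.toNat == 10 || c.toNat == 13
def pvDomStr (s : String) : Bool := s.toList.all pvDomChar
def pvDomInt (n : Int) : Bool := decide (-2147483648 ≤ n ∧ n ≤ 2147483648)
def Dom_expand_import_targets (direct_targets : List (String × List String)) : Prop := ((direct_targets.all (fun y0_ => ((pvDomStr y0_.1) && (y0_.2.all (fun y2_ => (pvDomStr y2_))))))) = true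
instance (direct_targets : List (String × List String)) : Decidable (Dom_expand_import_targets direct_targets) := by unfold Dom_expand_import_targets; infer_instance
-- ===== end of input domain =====

-- B replaces A's per-source forward DFS by: build the transposed graph once, compute each
-- node's ancestor set by level-synchronous frontier expansion on it, transpose back
-- (objective: alternative). The Python values are dicts of SETS; a Python set has no
-- observable order (hash order, not modelled by PySem), so BOTH ports return each result
-- set in sorted order — the canonical representation of the unordered value; equality of
-- Python set values is exactly equality of these sorted lists.

-- ===== PORT A =====
-- termination helpers for the while-loops (cited by decreasing_by)
theorem pv_filter_lt (univ : List String) (s t : PySem.Set String) (x : String)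
    (hsub : ∀ y, y ∈ s → y ∈ t) (hx : x ∈ univ) (hxs : x ∉ s) (hxt : x ∈ t) :
    (univ.filter (fun y => !(PySem.Set.contains t y))).length <
    (univ.filter (fun y => !(PySem.Set.contains s y))).length := by
  have hsubl : (univ.filter (fun y => !(PySem.Set.contains t y))).Sublist
      (univ.filter (fun y => !(PySem.Set.contains s y))) := by
    apply List.monotone_filter_right
    intro y hy
    simp only [Bool.not_eq_eq_eq_not, Bool.not_true, ← Bool.not_eq_true,
      PySem.Set.contains_iff] at *
    tauto
  rcases Nat.lt_or_ge (univ.filter (fun y => !(PySem.Set.contains t y))).length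
      (univ.filter (fun y => !(PySem.Set.contains s y))).length with h | h
  · exact h
  · exfalso
    have heq := hsubl.eq_of_length (Nat.le_antisymm hsubl.length_le h)
    have hxin : x ∈ univ.filter (fun y => !(PySem.Set.contains s y)) := by
      simp only [List.mem_filter, Bool.not_eq_eq_eq_not, Bool.not_true]
      refine ⟨hx, ?_⟩
      rw [← Bool.not_eq_true, PySem.Set.contains_iff]
      exact hxs
    rw [← heq] at hxin
    simp only [List.mem_filter, Bool.not_eq_eq_eq_not, Bool.not_true, ← Bool.not_eq_true,
      PySem.Set.contains_iff] at hxin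
    exact hxin.2 hxt

theorem pv_filter_unseen_eq (l : List String) (seen : PySem.Set String) (t : String)
    (ht : t ∉ l) :
    (l.filter (fun x => !(PySem.Set.contains (PySem.Set.add seen t) x))) =
    (l.filter (fun x => !(PySem.Set.contains seen x))) := by
  apply List.filter_congr
  intro x hx
  have hxt : x ≠ t := fun h => ht (h ▸ hx)
  simp only [Bool.not_eq_eq_eq_not]
  by_cases hmem : x ∈ seen
  · simp [hmem, PySem.Set.mem_add]
  · simp [hmem, PySem.Set.mem_add, hxt]

theorem pv_getD_nil_of_not_mem_keys (g : PySem.Dict String (List String)) (t : String)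
    (ht : t ∉ g.keys) : g.getD t [] = [] := by
  apply PySem.Dict.getD_of_not_contains
  rw [← Bool.not_eq_true, PySem.Dict.contains_iff_mem_keys]
  exact ht

-- A's while-loop. Python pops from the END of `stack`; the stack is kept reversed here
-- (head = top), so `stack.extend(adj)` becomes `adj.reverse ++ rest` — same values, same pop order.
def pvALoop (g : PySem.Dict String (List String)) :
    List String → PySem.Set String → PySem.Set String
  | [], seen => seen
  | t :: rest, seen =>
    if PySem.Set.contains seen t then
      pvALoop g rest seen
    else
      pvALoop g ((g.getD t []).reverse ++ rest) (PySem.Set.add seen t)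
termination_by stack seen =>
  (((g.keys).filter (fun x => !(PySem.Set.contains seen x))).length, stack.length)
decreasing_by
  · apply Prod.Lex.right
    simp
  · rename_i hns
    by_cases hk : t ∈ g.keys
    · apply Prod.Lex.left
      apply pv_filter_lt g.keys seen (PySem.Set.add seen t) t
      · intro y hy; rw [PySem.Set.mem_add]; exact Or.inl hy
      · exact hk
      · rw [← PySem.Set.contains_iff]; exact hns
      · rw [PySem.Set.mem_add]; exact Or.inr rfl
    · rw [pv_filter_unseen_eq g.keys seen t hk, pv_getD_nil_of_not_mem_keys g t hk]
      apply Prod.Lex.right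
      simp

def expand_import_targets (direct_targets : List (String × List String)) : List (String × List String) :=
  ((PySem.Dict.mk direct_targets).keys.foldl
    (fun expanded source =>
      expanded.insert source
        (pvALoop (PySem.Dict.mk direct_targets)
          (((PySem.Dict.mk direct_targets).getD source []).reverse) PySem.Set.empty))
    PySem.Dict.empty).items.map (fun p => (p.1, PySem.List.sorted p.2 (fun x => x) false))

-- ===== PORT B =====
-- reverse = {}; for source, targets in direct_targets.items(): for target in targets:
--   reverse.setdefault(target, set()).add(source)   (in-place add = insert of the grown set)
def pvRev (direct_targets : List (String × List String)) : PySem.Dict String (List String) :=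
  (PySem.Dict.mk direct_targets).items.foldl
    (fun rev p => p.2.foldl
      (fun rev t => rev.insert t (PySem.Set.add (rev.getD t []) p.1)) rev)
    PySem.Dict.empty

-- step = set(); for u in frontier: step |= reverse.get(u, set())
def pvStep (rev : PySem.Dict String (List String)) (frontier : List String) : PySem.Set String :=
  frontier.foldl (fun s u => PySem.Set.union s (rev.getD u [])) PySem.Set.empty

-- universe used only by the termination measure of the frontier loop
def pvUniv (rev : PySem.Dict String (List String)) : List String := rev.values.flatten

theorem pv_foldl_union_mem (rev : PySem.Dict String (List String)) (fr : List String)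
    (acc : PySem.Set String) (x : String) :
    x ∈ fr.foldl (fun s u => PySem.Set.union s (rev.getD u [])) acc ↔
      x ∈ acc ∨ ∃ u ∈ fr, x ∈ rev.getD u [] := by
  induction fr generalizing acc with
  | nil => simp
  | cons u fr ih =>
    rw [List.foldl_cons, ih, PySem.Set.mem_union]
    simp only [List.mem_cons]
    constructor
    · rintro ((h | h) | ⟨v, hv, hx⟩)
      · exact Or.inl h
      · exact Or.inr ⟨u, Or.inl rfl, h⟩
      · exact Or.inr ⟨v, Or.inr hv, hx⟩
    · rintro (h | ⟨v, (rfl | hv), hx⟩)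
      · exact Or.inl (Or.inl h)
      · exact Or.inl (Or.inr hx)
      · exact Or.inr ⟨v, hv, hx⟩

theorem pv_mem_step (rev : PySem.Dict String (List String)) (frontier : List String)
    (x : String) : x ∈ pvStep rev frontier ↔ ∃ u ∈ frontier, x ∈ rev.getD u [] := by
  unfold pvStep
  rw [pv_foldl_union_mem]
  have : x ∉ (PySem.Set.empty : PySem.Set String) := by
    intro h; exact absurd h (List.not_mem_nil)
  tauto

theorem pv_getD_subset_values_flatten (d : PySem.Dict String (List String)) (u x : String)
    (hx : x ∈ d.getD u []) : x ∈ d.values.flatten := by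
  rw [PySem.Dict.getD_eq_get?_getD] at hx
  cases hg : d.get? u with
  | none => rw [hg] at hx; simp at hx
  | some v =>
    rw [hg] at hx
    simp only [Option.getD_some] at hx
    have hv : (u, v) ∈ d.items := PySem.Dict.mem_items_of_get?_eq_some d hg
    rw [List.mem_flatten]
    refine ⟨v, ?_, hx⟩
    have : d.values = d.items.map (fun p => p.2) := rfl
    rw [this, List.mem_map]
    exact ⟨(u, v), hv, rfl⟩

theorem pv_mem_step_univ (rev : PySem.Dict String (List String)) (frontier : List String)
    (x : String) (hx : x ∈ pvStep rev frontier) : x ∈ pvUniv rev := by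
  obtain ⟨u, _, hxu⟩ := (pv_mem_step rev frontier x).mp hx
  exact pv_getD_subset_values_flatten rev u x hxu

-- while frontier: step = …; frontier = step - ancestors; ancestors |= frontier
def pvBFS (rev : PySem.Dict String (List String)) :
    List String → PySem.Set String → PySem.Set String
  | [], anc => anc
  | u :: fr, anc =>
    pvBFS rev (PySem.Set.diff (pvStep rev (u :: fr)) anc)
      (PySem.Set.union anc (PySem.Set.diff (pvStep rev (u :: fr)) anc))
termination_by frontier anc =>
  (((pvUniv rev).filter (fun y => !(PySem.Set.contains anc y))).length, frontier.length)
decreasing_by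
  by_cases hfr : PySem.Set.diff (pvStep rev (u :: fr)) anc = []
  · rw [hfr]
    have hu : PySem.Set.union anc ([] : List String) = anc := rfl
    rw [hu]
    apply Prod.Lex.right
    simp
  · obtain ⟨x, hx⟩ := List.exists_mem_of_ne_nil _ hfr
    have hxd := (PySem.Set.mem_diff _ _ _).mp hx
    apply Prod.Lex.left
    apply pv_filter_lt (pvUniv rev) anc _ x
    · intro y hy; rw [PySem.Set.mem_union]; exact Or.inl hy
    · exact pv_mem_step_univ rev _ x hxd.1
    · exact hxd.2
    · rw [PySem.Set.mem_union]; exact Or.inr hx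

-- ancestors = set(reverse[node]); frontier = ancestors; while frontier: …
def pvAnc (rev : PySem.Dict String (List String)) (node : String) : PySem.Set String :=
  pvBFS rev (PySem.Set.ofList (rev.getD node [])) (PySem.Set.ofList (rev.getD node []))

-- for source in ancestors: if source in expanded: expanded[source].add(node)
def pvUpd (node : String) (out : PySem.Dict String (List String)) (s : String) :
    PySem.Dict String (List String) :=
  if out.contains s then out.insert s (PySem.Set.add (out.getD s []) node) else out

def pvOutStep (rev : PySem.Dict String (List String))
    (out : PySem.Dict String (List String)) (node : String) :
    PySem.Dict String (List String) :=
  (pvAnc rev node).foldl (pvUpd node) out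

-- expanded = {source: set() for source in direct_targets}
def pvExpanded0 (direct_targets : List (String × List String)) : PySem.Dict String (List String) :=
  (PySem.Dict.mk direct_targets).keys.foldl
    (fun d s => d.insert s PySem.Set.empty) PySem.Dict.empty

def expand_import_targets_alt (direct_targets : List (String × List String)) : List (String × List String) :=
  ((pvRev direct_targets).keys.foldl (pvOutStep (pvRev direct_targets))
    (pvExpanded0 direct_targets)).items.map
    (fun p => (p.1, PySem.List.sorted p.2 (fun x => x) false))

-- ===== PRECONDITION & SPEC =====
-- Pre_ excludes association lists with duplicate keys: they do not denote a Python dict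
-- (A's parameter is a dict), so A is never run on them.
def Pre_expand_import_targets (direct_targets : List (String × List String)) : Prop :=
  (direct_targets.map Prod.fst).Nodup
instance (direct_targets : List (String × List String)) : Decidable (Pre_expand_import_targets direct_targets) := by unfold Pre_expand_import_targets; infer_instance

def pvWitness_expand_import_targets : (List (String × List String)) :=
  [("a", ["b", "c"]), ("b", ["c"]), ("c", ["a"])]

def Spec_expand_import_targets (direct_targets : List (String × List String)) (out : List (String × List String)) : Prop := out = expand_import_targets_alt direct_targets
instance (direct_targets : List (String × List String)) (out : List (String × List String)) : Decidable (Spec_expand_import_targets direct_targets out) := by unfold Spec_expand_import_targets; infer_instance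

-- ===== CLAIM (what is proved, stated in full; the proofs are below) =====
def Claim_equal_expand_import_targets : Prop := ∀ (direct_targets : List (String × List String)), Dom_expand_import_targets direct_targets → Pre_expand_import_targets direct_targets → Spec_expand_import_targets direct_targets (expand_import_targets direct_targets)

-- ===== LEMMAS AND PROOFS =====

-- the edge relation of the dict g read as a graph: u imports v
def pvE (g : PySem.Dict String (List String)) (u v : String) : Prop := v ∈ g.getD u []

-- a set closed under the edges absorbs reachability
theorem pv_closed_rtg (g : PySem.Dict String (List String)) (S : String → Prop)
    (hS : ∀ u, S u → ∀ v, pvE g u v → S v) {t x : String}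
    (h : Relation.ReflTransGen (pvE g) t x) (ht : S t) : S x := by
  induction h with
  | refl => exact ht
  | tail _ hbc ih => exact hS _ ih _ hbc

-- A's loop computes: seen plus everything reachable (≥0 edges) from the stack
theorem pvALoop_mem (g : PySem.Dict String (List String)) (stack : List String)
    (seen : PySem.Set String) :
    (∀ u ∈ seen, ∀ v ∈ g.getD u [], v ∈ seen ∨ v ∈ stack) → ∀ x : String,
    (x ∈ pvALoop g stack seen ↔
      x ∈ seen ∨ ∃ t ∈ stack, Relation.ReflTransGen (pvE g) t x) := by
  induction stack, seen using pvALoop.induct g with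
  | case1 seen =>
    intro _ x
    simp [pvALoop]
  | case2 t rest seen hc ih =>
    intro hinv x
    have ht : t ∈ seen := (PySem.Set.contains_iff seen t).mp hc
    have hinv' : ∀ u ∈ seen, ∀ v ∈ g.getD u [], v ∈ seen ∨ v ∈ rest := by
      intro u hu v hv
      rcases hinv u hu v hv with h | h
      · exact Or.inl h
      · rcases List.mem_cons.mp h with rfl | h
        · exact Or.inl ht
        · exact Or.inr h
    rw [pvALoop, if_pos hc, ih hinv' x]
    constructor
    · rintro (h | ⟨t', ht', hr⟩)
      · exact Or.inl h
      · exact Or.inr ⟨t', List.mem_cons_of_mem _ ht', hr⟩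
    · rintro (h | ⟨t', ht', hr⟩)
      · exact Or.inl h
      · rcases List.mem_cons.mp ht' with rfl | ht'
        · -- t' = t ∈ seen: reachability from t stays inside seen ∪ reach(rest)
          exact pv_closed_rtg g
            (fun y => y ∈ seen ∨ ∃ u ∈ rest, Relation.ReflTransGen (pvE g) u y)
            (by
              intro u hu v huv
              rcases hu with hu | ⟨u', hu', hr'⟩
              · rcases hinv' u hu v huv with h | h
                · exact Or.inl h
                · exact Or.inr ⟨v, h, Relation.ReflTransGen.refl⟩
              · exact Or.inr ⟨u', hu', hr'.tail huv⟩)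
            hr (Or.inl ht)
        · exact Or.inr ⟨t', ht', hr⟩
  | case3 t rest seen hc ih =>
    intro hinv x
    have ht : t ∉ seen := by
      intro h; exact absurd ((PySem.Set.contains_iff seen t).mpr h) (by simpa using hc)
    have hinv' : ∀ u ∈ PySem.Set.add seen t, ∀ v ∈ g.getD u [],
        v ∈ PySem.Set.add seen t ∨ v ∈ (g.getD t []).reverse ++ rest := by
      intro u hu v hv
      rcases (PySem.Set.mem_add seen t u).mp hu with hu | rfl
      · rcases hinv u hu v hv with h | h
        · exact Or.inl ((PySem.Set.mem_add seen t v).mpr (Or.inl h))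
        · rcases List.mem_cons.mp h with rfl | h
          · exact Or.inl ((PySem.Set.mem_add seen v v).mpr (Or.inr rfl))
          · exact Or.inr (List.mem_append_right _ h)
      · exact Or.inr (List.mem_append_left _ (List.mem_reverse.mpr hv))
    rw [pvALoop, if_neg hc, ih hinv' x]
    constructor
    · rintro (h | ⟨t', ht', hr⟩)
      · rcases (PySem.Set.mem_add seen t x).mp h with h | rfl
        · exact Or.inl h
        · exact Or.inr ⟨x, List.mem_cons_self .., Relation.ReflTransGen.refl⟩
      · rcases List.mem_append.mp ht' with ht' | ht'
        · exact Or.inr ⟨t, List.mem_cons_self ..,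
            Relation.ReflTransGen.head (List.mem_reverse.mp ht') hr⟩
        · exact Or.inr ⟨t', List.mem_cons_of_mem _ ht', hr⟩
    · rintro (h | ⟨t', ht', hr⟩)
      · exact Or.inl ((PySem.Set.mem_add seen t x).mpr (Or.inl h))
      · rcases List.mem_cons.mp ht' with rfl | ht'
        · rcases Relation.ReflTransGen.cases_head hr with heq | ⟨c, hc1, hc2⟩
          · exact Or.inl ((PySem.Set.mem_add seen t' x).mpr (Or.inr heq.symm))
          · exact Or.inr ⟨c, List.mem_append_left _ (List.mem_reverse.mpr hc1), hc2⟩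
        · exact Or.inr ⟨t', List.mem_append_right _ ht', hr⟩

theorem pvALoop_nodup (g : PySem.Dict String (List String)) (stack : List String)
    (seen : PySem.Set String) : seen.Nodup → (pvALoop g stack seen).Nodup := by
  induction stack, seen using pvALoop.induct g with
  | case1 seen => intro h; simpa [pvALoop] using h
  | case2 t rest seen hc ih =>
    intro h
    rw [pvALoop, if_pos hc]
    exact ih h
  | case3 t rest seen hc ih =>
    intro h
    rw [pvALoop, if_neg hc]
    exact ih (PySem.Set.nodup_add seen t h)

-- B's frontier loop computes: ancestors plus everything reachable (≥1 edge) from the frontier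
theorem pvBFS_mem (rev : PySem.Dict String (List String)) (frontier : List String)
    (anc : PySem.Set String) :
    (∀ y ∈ frontier, y ∈ anc) →
    (∀ u ∈ anc, u ∈ frontier ∨ ∀ v ∈ rev.getD u [], v ∈ anc) → ∀ x : String,
    (x ∈ pvBFS rev frontier anc ↔
      x ∈ anc ∨ ∃ u ∈ frontier, Relation.TransGen (pvE rev) u x) := by
  induction frontier, anc using pvBFS.induct rev with
  | case1 anc =>
    intro _ _ x
    simp [pvBFS]
  | case2 u fr anc ih =>
    intro h1 h2 x
    set st := pvStep rev (u :: fr) with hst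
    set fr' := PySem.Set.diff st anc with hfr'
    set anc' := PySem.Set.union anc fr' with hanc'
    have hsub : ∀ y ∈ anc, y ∈ anc' := fun y hy => (PySem.Set.mem_union anc fr' y).mpr (Or.inl hy)
    have hst_mem : ∀ y, y ∈ st ↔ ∃ w ∈ u :: fr, y ∈ rev.getD w [] := fun y => pv_mem_step rev _ y
    have hst_sub : ∀ y ∈ st, y ∈ anc' := by
      intro y hy
      by_cases hya : y ∈ anc
      · exact hsub y hya
      · exact (PySem.Set.mem_union anc fr' y).mpr (Or.inr ((PySem.Set.mem_diff st anc y).mpr ⟨hy, hya⟩))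
    have h1' : ∀ y ∈ fr', y ∈ anc' := fun y hy => (PySem.Set.mem_union anc fr' y).mpr (Or.inr hy)
    have h2' : ∀ w ∈ anc', w ∈ fr' ∨ ∀ v ∈ rev.getD w [], v ∈ anc' := by
      intro w hw
      rcases (PySem.Set.mem_union anc fr' w).mp hw with hw | hw
      · rcases h2 w hw with hw' | hw'
        · exact Or.inr (fun v hv => hst_sub v ((hst_mem v).mpr ⟨w, hw', hv⟩))
        · exact Or.inr (fun v hv => hsub v (hw' v hv))
      · exact Or.inl hw
    rw [pvBFS, ih h1' h2' x]
    constructor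
    · rintro (h | ⟨w, hw, htg⟩)
      · rcases (PySem.Set.mem_union anc fr' x).mp h with h | h
        · exact Or.inl h
        · obtain ⟨w0, hw0, hx0⟩ := (hst_mem x).mp ((PySem.Set.mem_diff st anc x).mp h).1
          exact Or.inr ⟨w0, hw0, Relation.TransGen.single hx0⟩
      · obtain ⟨w0, hw0, hx0⟩ := (hst_mem w).mp ((PySem.Set.mem_diff st anc w).mp hw).1
        exact Or.inr ⟨w0, hw0, Relation.TransGen.head hx0 htg⟩
    · rintro (h | ⟨w, hw, htg⟩)
      · exact Or.inl (hsub x h)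
      · obtain ⟨y, hwy, hyx⟩ := Relation.TransGen.head'_iff.mp htg
        have hyst : y ∈ st := (hst_mem y).mpr ⟨w, hw, hwy⟩
        have hT : x ∈ anc' ∨ ∃ v ∈ fr', Relation.ReflTransGen (pvE rev) v x := by
          apply pv_closed_rtg rev
            (fun z => z ∈ anc' ∨ ∃ v ∈ fr', Relation.ReflTransGen (pvE rev) v z)
            ?_ hyx (Or.inl (hst_sub y hyst))
          intro p hp q hpq
          rcases hp with hp | ⟨v, hv, hrv⟩
          · rcases h2' p hp with hp' | hp'
            · exact Or.inr ⟨p, hp', Relation.ReflTransGen.single hpq⟩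
            · exact Or.inl (hp' q hpq)
          · exact Or.inr ⟨v, hv, hrv.tail hpq⟩
        rcases hT with h | ⟨v, hv, hrv⟩
        · exact Or.inl h
        · rcases Relation.reflTransGen_iff_eq_or_transGen.mp hrv with heq | htg'
          · exact Or.inl (heq ▸ h1' v hv)
          · exact Or.inr ⟨v, hv, htg'⟩

theorem pvAnc_mem (rev : PySem.Dict String (List String)) (node x : String) :
    x ∈ pvAnc rev node ↔ Relation.TransGen (pvE rev) node x := by
  unfold pvAnc
  rw [pvBFS_mem rev _ _ (fun y hy => hy) (fun u hu => Or.inl hu) x]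
  constructor
  · rintro (h | ⟨w, hw, htg⟩)
    · exact Relation.TransGen.single ((PySem.Set.mem_ofList _ x).mp h)
    · exact Relation.TransGen.head ((PySem.Set.mem_ofList _ w).mp hw) htg
  · intro h
    rcases Relation.TransGen.head'_iff.mp h with ⟨b, hb, hbx⟩
    rcases Relation.reflTransGen_iff_eq_or_transGen.mp hbx with heq | htg
    · exact Or.inl ((PySem.Set.mem_ofList _ x).mpr (heq ▸ hb))
    · exact Or.inr ⟨b, (PySem.Set.mem_ofList _ b).mpr hb, htg⟩

-- the reverse dict is the transposed edge relation
theorem pv_revinner_mem (src : String) (M : List String)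
    (rev : PySem.Dict String (List String)) (t x : String) :
    x ∈ (M.foldl (fun rev t' => rev.insert t' (PySem.Set.add (rev.getD t' []) src)) rev).getD t []
      ↔ x ∈ rev.getD t [] ∨ (x = src ∧ t ∈ M) := by
  induction M generalizing rev with
  | nil => simp
  | cons m M ih =>
    rw [List.foldl_cons, ih]
    by_cases htm : t = m
    · subst htm
      rw [PySem.Dict.getD_insert, if_pos rfl]
      rw [PySem.Set.mem_add]
      simp only [List.mem_cons]
      tauto
    · rw [PySem.Dict.getD_insert, if_neg htm]
      simp only [List.mem_cons]
      tauto

theorem pv_revouter_mem (L : List (String × List String))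
    (rev0 : PySem.Dict String (List String)) (t x : String) :
    x ∈ (L.foldl (fun rev p => p.2.foldl
        (fun rev t' => rev.insert t' (PySem.Set.add (rev.getD t' []) p.1)) rev) rev0).getD t []
      ↔ x ∈ rev0.getD t [] ∨ ∃ p ∈ L, x = p.1 ∧ t ∈ p.2 := by
  induction L generalizing rev0 with
  | nil => simp
  | cons p L ih =>
    rw [List.foldl_cons, ih, pv_revinner_mem]
    simp only [List.mem_cons]
    constructor
    · rintro ((h | ⟨hx, ht⟩) | ⟨q, hq, hxq, htq⟩)
      · exact Or.inl h
      · exact Or.inr ⟨p, Or.inl rfl, hx, ht⟩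
      · exact Or.inr ⟨q, Or.inr hq, hxq, htq⟩
    · rintro (h | ⟨q, (rfl | hq), hxq, htq⟩)
      · exact Or.inl (Or.inl h)
      · exact Or.inl (Or.inr ⟨hxq, htq⟩)
      · exact Or.inr ⟨q, hq, hxq, htq⟩

theorem pvRev_mem (direct_targets : List (String × List String))
    (hnd : (direct_targets.map Prod.fst).Nodup) (s t : String) :
    s ∈ (pvRev direct_targets).getD t [] ↔
      t ∈ (PySem.Dict.mk direct_targets).getD s [] := by
  have hkeys : (PySem.Dict.mk direct_targets).keys.Nodup := by
    rw [PySem.Dict.keys_mk]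
    exact hnd
  have hitems : (PySem.Dict.mk direct_targets).items = direct_targets := rfl
  unfold pvRev
  rw [hitems, pv_revouter_mem]
  rw [PySem.Dict.getD_empty]
  simp only [List.not_mem_nil, false_or]
  constructor
  · rintro ⟨p, hp, rfl, htp⟩
    have : (PySem.Dict.mk direct_targets).getD p.1 [] = p.2 := by
      apply PySem.Dict.getD_of_mem_items
      · rw [hitems]; exact hp
      · exact hkeys
    rw [this]
    exact htp
  · intro h
    rw [PySem.Dict.getD_eq_get?_getD] at h
    cases hg : (PySem.Dict.mk direct_targets).get? s with
    | none => rw [hg] at h; simp at h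
    | some v =>
      rw [hg] at h
      simp only [Option.getD_some] at h
      have hv := PySem.Dict.mem_items_of_get?_eq_some _ hg
      rw [hitems] at hv
      exact ⟨(s, v), hv, rfl, h⟩

theorem pvE_rev_iff (direct_targets : List (String × List String))
    (hnd : (direct_targets.map Prod.fst).Nodup) (u v : String) :
    pvE (pvRev direct_targets) u v ↔ pvE (PySem.Dict.mk direct_targets) v u := by
  unfold pvE
  exact pvRev_mem direct_targets hnd v u

theorem pv_tg_rev_iff (direct_targets : List (String × List String))
    (hnd : (direct_targets.map Prod.fst).Nodup) (u v : String) :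
    Relation.TransGen (pvE (pvRev direct_targets)) u v ↔
      Relation.TransGen (pvE (PySem.Dict.mk direct_targets)) v u := by
  constructor
  · intro h
    exact Relation.transGen_swap.mp
      (Relation.TransGen.mono (fun a b hab => (pvE_rev_iff direct_targets hnd a b).mp hab) h)
  · intro h
    have h' : Relation.TransGen (Function.swap (pvE (PySem.Dict.mk direct_targets))) u v :=
      Relation.transGen_swap.mpr h
    exact Relation.TransGen.mono
      (fun a b hab => (pvE_rev_iff direct_targets hnd a b).mpr hab) h' 

-- every node reachable by ≥1 edge has an in-edge, so it is a key of the reverse dict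
theorem pv_reach_mem_rev_keys (direct_targets : List (String × List String))
    (hnd : (direct_targets.map Prod.fst).Nodup) (s x : String)
    (h : Relation.TransGen (pvE (PySem.Dict.mk direct_targets)) s x) :
    x ∈ (pvRev direct_targets).keys := by
  obtain ⟨b, _, hbx⟩ := Relation.TransGen.tail'_iff.mp h
  have hb : b ∈ (pvRev direct_targets).getD x [] := (pvRev_mem direct_targets hnd b x).mpr hbx
  by_contra hx
  rw [pv_getD_nil_of_not_mem_keys _ _ hx] at hb
  exact absurd hb (List.not_mem_nil)

-- the update loop over the ancestors of one node
theorem pvUpd_contains (node : String) (out : PySem.Dict String (List String)) (s k : String) :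
    (pvUpd node out s).contains k = out.contains k := by
  unfold pvUpd
  split_ifs with hc
  · rw [PySem.Dict.contains_insert]
    by_cases hk : k = s
    · subst hk; simp [hc]
    · simp [hk]
  · rfl

theorem pvUpd_keys (node : String) (out : PySem.Dict String (List String)) (s : String) :
    (pvUpd node out s).keys = out.keys := by
  unfold pvUpd
  split_ifs with hc
  · exact PySem.Dict.keys_insert_of_contains out _ hc
  · rfl

theorem pvUpd_mem_getD (node : String) (out : PySem.Dict String (List String)) (s' s x : String) :
    x ∈ (pvUpd node out s').getD s [] ↔
      x ∈ out.getD s [] ∨ (out.contains s = true ∧ s = s' ∧ x = node) := by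
  unfold pvUpd
  split_ifs with hc
  · rw [PySem.Dict.getD_insert]
    by_cases hss : s = s'
    · subst hss
      rw [if_pos rfl, PySem.Set.mem_add]
      tauto
    · rw [if_neg hss]
      tauto
  · by_cases hss : s = s'
    · subst hss
      have : out.contains s = false := by simpa using hc
      simp [this]
    · tauto

theorem pvUpd_getD_nodup (node : String) (out : PySem.Dict String (List String)) (s' : String)
    (h : ∀ k, (out.getD k []).Nodup) (k : String) : ((pvUpd node out s').getD k []).Nodup := by
  unfold pvUpd
  split_ifs with hc
  · rw [PySem.Dict.getD_insert]
    by_cases hk : k = s'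
    · rw [if_pos hk]
      exact PySem.Set.nodup_add _ _ (h s')
    · rw [if_neg hk]
      exact h k
  · exact h k

theorem pv_foldS_contains (node : String) (S : List String)
    (out : PySem.Dict String (List String)) (k : String) :
    (S.foldl (pvUpd node) out).contains k = out.contains k := by
  induction S generalizing out with
  | nil => rfl
  | cons s S ih => rw [List.foldl_cons, ih, pvUpd_contains]

theorem pv_foldS_keys (node : String) (S : List String)
    (out : PySem.Dict String (List String)) :
    (S.foldl (pvUpd node) out).keys = out.keys := by
  induction S generalizing out with
  | nil => rfl
  | cons s S ih => rw [List.foldl_cons, ih, pvUpd_keys]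

theorem pv_foldS_mem (node : String) (S : List String)
    (out : PySem.Dict String (List String)) (s x : String) :
    x ∈ (S.foldl (pvUpd node) out).getD s [] ↔
      x ∈ out.getD s [] ∨ (out.contains s = true ∧ s ∈ S ∧ x = node) := by
  induction S generalizing out with
  | nil => simp
  | cons s' S ih =>
    rw [List.foldl_cons, ih, pvUpd_mem_getD, pvUpd_contains]
    simp only [List.mem_cons]
    constructor
    · rintro ((h | ⟨hc, hss, hx⟩) | ⟨hc, hs, hx⟩)
      · exact Or.inl h
      · exact Or.inr ⟨hc, Or.inl hss, hx⟩
      · exact Or.inr ⟨hc, Or.inr hs, hx⟩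
    · rintro (h | ⟨hc, (hss | hs), hx⟩)
      · exact Or.inl (Or.inl h)
      · exact Or.inl (Or.inr ⟨hc, hss, hx⟩)
      · exact Or.inr ⟨hc, hs, hx⟩

theorem pv_foldS_nodup (node : String) (S : List String)
    (out : PySem.Dict String (List String)) (h : ∀ k, (out.getD k []).Nodup) (k : String) :
    ((S.foldl (pvUpd node) out).getD k []).Nodup := by
  induction S generalizing out with
  | nil => exact h k
  | cons s S ih => exact ih _ (pvUpd_getD_nodup node out s h)

-- the outer loop over the nodes of the reverse dict
theorem pv_foldW_mem (rev : PySem.Dict String (List String)) (W : List String)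
    (out : PySem.Dict String (List String)) (s x : String) :
    x ∈ (W.foldl (pvOutStep rev) out).getD s [] ↔
      x ∈ out.getD s [] ∨ (out.contains s = true ∧ x ∈ W ∧ s ∈ pvAnc rev x) := by
  induction W generalizing out with
  | nil => simp
  | cons w W ih =>
    rw [List.foldl_cons, ih]
    unfold pvOutStep
    rw [pv_foldS_mem, pv_foldS_contains]
    simp only [List.mem_cons]
    constructor
    · rintro ((h | ⟨hc, hs, rfl⟩) | ⟨hc, hxW, hanc⟩)
      · exact Or.inl h
      · exact Or.inr ⟨hc, Or.inl rfl, hs⟩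
      · exact Or.inr ⟨hc, Or.inr hxW, hanc⟩
    · rintro (h | ⟨hc, (rfl | hxW), hanc⟩)
      · exact Or.inl (Or.inl h)
      · exact Or.inl (Or.inr ⟨hc, hanc, rfl⟩)
      · exact Or.inr ⟨hc, hxW, hanc⟩

theorem pv_foldW_keys (rev : PySem.Dict String (List String)) (W : List String)
    (out : PySem.Dict String (List String)) :
    (W.foldl (pvOutStep rev) out).keys = out.keys := by
  induction W generalizing out with
  | nil => rfl
  | cons w W ih => rw [List.foldl_cons, ih]; unfold pvOutStep; rw [pv_foldS_keys]

theorem pv_foldW_nodup (rev : PySem.Dict String (List String)) (W : List String)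
    (out : PySem.Dict String (List String)) (h : ∀ k, (out.getD k []).Nodup) (k : String) :
    ((W.foldl (pvOutStep rev) out).getD k []).Nodup := by
  induction W generalizing out with
  | nil => exact h k
  | cons w W ih =>
    rw [List.foldl_cons]
    exact ih _ (fun k' => pv_foldS_nodup w _ out h k')

-- the initial dict of empty sets
theorem pv_foldl_insert_empty_getD (L : List String) (d0 : PySem.Dict String (List String))
    (h : ∀ k, d0.getD k [] = []) (k : String) :
    (L.foldl (fun d s => d.insert s PySem.Set.empty) d0).getD k [] = [] := by
  induction L generalizing d0 with
  | nil => exact h k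
  | cons s L ih =>
    rw [List.foldl_cons]
    apply ih
    intro k'
    rw [PySem.Dict.getD_insert]
    by_cases hk : k' = s
    · rw [if_pos hk]; rfl
    · rw [if_neg hk]; exact h k'

theorem pvExpanded0_getD (direct_targets : List (String × List String)) (k : String) :
    (pvExpanded0 direct_targets).getD k [] = [] := by
  unfold pvExpanded0
  exact pv_foldl_insert_empty_getD _ _ (fun k' => PySem.Dict.getD_empty k' []) k

theorem pvExpanded0_keys (direct_targets : List (String × List String))
    (hnd : (direct_targets.map Prod.fst).Nodup) :
    (pvExpanded0 direct_targets).keys = (PySem.Dict.mk direct_targets).keys := by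
  unfold pvExpanded0
  rw [PySem.Dict.keys_foldl_insert _ (fun _ _ => PySem.Set.empty), PySem.Dict.keys_empty,
    PySem.Set.update_nil_left, PySem.Set.ofList_eq_self_of_nodup]
  rw [PySem.Dict.keys_mk]
  exact hnd

-- a fold inserting a value per distinct key, read back
theorem pv_foldl_insert_getD_notmem (L : List String) (V : String → List String)
    (d0 : PySem.Dict String (List String)) (s : String) (hs : s ∉ L) :
    (L.foldl (fun d x => d.insert x (V x)) d0).getD s [] = d0.getD s [] := by
  induction L generalizing d0 with
  | nil => rfl
  | cons a L ih =>
    rw [List.foldl_cons, ih _ (fun h => hs (List.mem_cons_of_mem _ h)), PySem.Dict.getD_insert,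
      if_neg (show ¬ s = a from fun h => hs (by rw [h]; exact List.mem_cons_self ..))]

theorem pv_foldl_insert_getD (L : List String) (V : String → List String)
    (d0 : PySem.Dict String (List String)) (s : String) (hnd : L.Nodup) (hs : s ∈ L) :
    (L.foldl (fun d x => d.insert x (V x)) d0).getD s [] = V s := by
  induction L generalizing d0 with
  | nil => exact absurd hs (List.not_mem_nil)
  | cons a L ih =>
    rw [List.foldl_cons]
    by_cases hsa : s = a
    · subst hsa
      rw [pv_foldl_insert_getD_notmem _ _ _ _ (List.nodup_cons.mp hnd).1,
        PySem.Dict.getD_insert, if_pos rfl]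
    · exact ih _ (List.nodup_cons.mp hnd).2 (List.mem_of_ne_of_mem hsa hs)

-- ===== VERDICT (by name: the statement is the Claim_ definition above) =====
theorem expand_import_targets_spec : Claim_equal_expand_import_targets := by
  intro dt _ hpre
  unfold Pre_expand_import_targets at hpre
  unfold Spec_expand_import_targets expand_import_targets expand_import_targets_alt
  have hgnd : (PySem.Dict.mk dt).keys.Nodup := by rw [PySem.Dict.keys_mk]; exact hpre
  -- A's result dict: keys and per-key values
  have hAkeys : ((PySem.Dict.mk dt).keys.foldl
      (fun expanded source => expanded.insert source
        (pvALoop (PySem.Dict.mk dt) (((PySem.Dict.mk dt).getD source []).reverse) PySem.Set.empty))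
      PySem.Dict.empty).keys = (PySem.Dict.mk dt).keys := by
    rw [PySem.Dict.keys_foldl_insert _
      (fun _ source => pvALoop (PySem.Dict.mk dt) (((PySem.Dict.mk dt).getD source []).reverse) PySem.Set.empty),
      PySem.Dict.keys_empty, PySem.Set.update_nil_left,
      PySem.Set.ofList_eq_self_of_nodup _ hgnd]
  -- B's result dict: keys
  have hBkeys : ((pvRev dt).keys.foldl (pvOutStep (pvRev dt)) (pvExpanded0 dt)).keys
      = (PySem.Dict.mk dt).keys := by
    rw [pv_foldW_keys, pvExpanded0_keys dt hpre]
  rw [PySem.Dict.items_eq_map_keys _ (hAkeys.symm ▸ hgnd) [],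
      PySem.Dict.items_eq_map_keys _ (hBkeys.symm ▸ hgnd) [],
      hAkeys, hBkeys, List.map_map, List.map_map]
  apply List.map_congr_left
  intro s hs
  simp only [Function.comp]
  have hA : ((PySem.Dict.mk dt).keys.foldl
      (fun expanded source => expanded.insert source
        (pvALoop (PySem.Dict.mk dt) (((PySem.Dict.mk dt).getD source []).reverse) PySem.Set.empty))
      PySem.Dict.empty).getD s []
      = pvALoop (PySem.Dict.mk dt) (((PySem.Dict.mk dt).getD s []).reverse) PySem.Set.empty :=
    pv_foldl_insert_getD _ _ _ _ hgnd hs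
  rw [hA]
  have hAmem : ∀ x, x ∈ pvALoop (PySem.Dict.mk dt) (((PySem.Dict.mk dt).getD s []).reverse) PySem.Set.empty
      ↔ Relation.TransGen (pvE (PySem.Dict.mk dt)) s x := by
    intro x
    rw [pvALoop_mem (PySem.Dict.mk dt) _ PySem.Set.empty
      (fun u hu => absurd hu (List.not_mem_nil)) x]
    rw [Relation.TransGen.head'_iff]
    constructor
    · rintro (h | ⟨t, ht, hr⟩)
      · exact absurd h (List.not_mem_nil)
      · exact ⟨t, List.mem_reverse.mp ht, hr⟩
    · rintro ⟨t, ht, hr⟩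
      exact Or.inr ⟨t, List.mem_reverse.mpr ht, hr⟩
  have hBmem : ∀ x, x ∈ ((pvRev dt).keys.foldl (pvOutStep (pvRev dt)) (pvExpanded0 dt)).getD s []
      ↔ Relation.TransGen (pvE (PySem.Dict.mk dt)) s x := by
    intro x
    rw [pv_foldW_mem, pvExpanded0_getD]
    have hcont : (pvExpanded0 dt).contains s = true := by
      rw [PySem.Dict.contains_iff_mem_keys, pvExpanded0_keys dt hpre]
      exact hs
    constructor
    · rintro (h | ⟨_, hxk, hanc⟩)
      · exact absurd h (List.not_mem_nil)
      · exact (pv_tg_rev_iff dt hpre x s).mp ((pvAnc_mem (pvRev dt) x s).mp hanc)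
    · intro h
      refine Or.inr ⟨hcont, pv_reach_mem_rev_keys dt hpre s x h, ?_⟩
      exact (pvAnc_mem (pvRev dt) x s).mpr ((pv_tg_rev_iff dt hpre x s).mpr h)
  have hnodA : (pvALoop (PySem.Dict.mk dt) (((PySem.Dict.mk dt).getD s []).reverse) PySem.Set.empty).Nodup :=
    pvALoop_nodup _ _ _ List.nodup_nil
  have hnodB : (((pvRev dt).keys.foldl (pvOutStep (pvRev dt)) (pvExpanded0 dt)).getD s []).Nodup :=
    pv_foldW_nodup _ _ _ (fun k => by rw [pvExpanded0_getD]; exact List.nodup_nil) s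
  have hperm : (pvALoop (PySem.Dict.mk dt) (((PySem.Dict.mk dt).getD s []).reverse) PySem.Set.empty).Perm
      (((pvRev dt).keys.foldl (pvOutStep (pvRev dt)) (pvExpanded0 dt)).getD s []) := by
    rw [List.perm_ext_iff_of_nodup hnodA hnodB]
    intro x
    rw [hAmem x, hBmem x]
  rw [Prod.mk.injEq]
  exact ⟨rfl, (PySem.List.sorted_id_eq_sorted_id_iff_perm _ _).mpr hperm⟩
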